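-- pv_equiv track=rewrite | github.com/PNeekeetah/AdventOfCode2024 | day9.py | get_test_inputs
-- ===== SOURCE A (Python) =====
-- def get_test_inputs(input):
--     numbers = []
--
--     lines = input.split('\n')
--     for line in lines:
--         if line == '':
--             continue
--         numbers.extend(list(line))
--
--     return numbers
-- ===== SOURCE B (Python) =====
-- def get_test_inputs(input):
--     # One flat pass: keep every character of the raw input except newlines.
--     return [c for c in input if c != '\n']
-- ===== Notes on version B (the rewrite author's own statement) =====
-- stated objective: simpler
-- what changed: Replaces split-into-lines plus a nested per-line extend loop by a single flat filter over the raw string keeping every non-newline character.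
import Mathlib
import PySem

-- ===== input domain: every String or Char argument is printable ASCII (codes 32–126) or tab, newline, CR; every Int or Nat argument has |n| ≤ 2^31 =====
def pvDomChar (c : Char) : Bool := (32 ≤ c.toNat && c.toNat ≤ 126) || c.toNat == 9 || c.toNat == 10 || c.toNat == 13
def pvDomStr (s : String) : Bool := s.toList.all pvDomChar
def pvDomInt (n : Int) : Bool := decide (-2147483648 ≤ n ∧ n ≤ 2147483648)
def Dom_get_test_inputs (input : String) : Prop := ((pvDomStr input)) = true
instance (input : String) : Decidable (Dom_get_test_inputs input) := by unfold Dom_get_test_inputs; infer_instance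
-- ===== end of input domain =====

-- B replaces A's split-into-lines + nested per-line extend with one flat filter dropping '\n' (simpler).


-- ===== PORT A =====
def get_test_inputs (input : String) : List String :=
  let lines : List String := (PySem.Chars.splitOn input.toList ['\n']).map String.ofList
  lines.foldl (fun numbers line =>
    if line = "" then numbers
    else numbers ++ line.toList.map (fun c => String.ofList [c])) []

-- ===== PORT B =====
def get_test_inputs_alt (input : String) : List String :=
  (input.toList.filter (fun c => c ≠ '\n')).map (fun c => String.ofList [c])

-- ===== PRECONDITION & SPEC =====
def Spec_get_test_inputs (input : String) (out : List String) : Prop := out = get_test_inputs_alt input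
instance (input : String) (out : List String) : Decidable (Spec_get_test_inputs input out) := by unfold Spec_get_test_inputs; infer_instance

-- ===== CLAIM (what is proved, stated in full; the proofs are below) =====
def Claim_equal_get_test_inputs : Prop := ∀ (input : String), Dom_get_test_inputs input → Spec_get_test_inputs input (get_test_inputs input)

-- ===== LEMMAS AND PROOFS =====

-- The splitter's worker: flattening its result appends the pending piece and the non-'\n' chars of the rest.
lemma go_flatten (fuel : Nat) : ∀ (l cur : List Char) (acc : List (List Char)),
    l.length < fuel →
    (PySem.Chars.splitOn.go ['\n'] fuel l cur acc).flatten =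
      acc.reverse.flatten ++ cur.reverse ++ l.filter (fun c => c ≠ '\n') := by
  induction fuel with
  | zero => intro l cur acc h; omega
  | succ fuel ih =>
    intro l cur acc h
    cases l with
    | nil => simp [PySem.Chars.splitOn.go]
    | cons c rest =>
      rw [PySem.Chars.splitOn.go]
      by_cases hc : c = '\n'
      · subst hc
        have hpre : (['\n'] : List Char).isPrefixOf ('\n' :: rest) = true := by
          simp [List.isPrefixOf]
        simp only [hpre, if_true, List.length_singleton, List.drop_succ_cons, List.drop_zero]
        rw [ih rest [] (cur.reverse :: acc) (by simpa using Nat.lt_of_succ_lt_succ h)]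
        simp
      · have hpre : (['\n'] : List Char).isPrefixOf (c :: rest) = false := by
          simp [List.isPrefixOf, Ne.symm hc]
        simp only [hpre, Bool.false_eq_true, if_false]
        rw [ih rest (c :: cur) acc (Nat.lt_of_succ_lt_succ h)]
        simp [hc]

lemma splitOn_newline_flatten (cs : List Char) :
    (PySem.Chars.splitOn cs ['\n']).flatten = cs.filter (fun c => c ≠ '\n') := by
  rw [PySem.Chars.splitOn]
  rw [go_flatten (cs.length + 1) cs [] [] (Nat.lt_succ_self _)]
  simp

-- A's loop over the lines, characterised: the 'empty line' branch is absorbed by the empty map.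
lemma foldl_lines (lines : List (List Char)) : ∀ (acc : List String),
    (lines.map String.ofList).foldl (fun numbers line =>
        if line = "" then numbers
        else numbers ++ line.toList.map (fun c => String.ofList [c])) acc =
      acc ++ lines.flatten.map (fun c => String.ofList [c]) := by
  induction lines with
  | nil => intro acc; simp
  | cons l ls ih =>
    intro acc
    by_cases hl : l = []
    · subst hl; simp [ih]
    · have hne : String.ofList l ≠ "" := by
        intro hcontra
        exact hl (by simpa using congrArg String.toList hcontra)
      simp [hne, ih]

-- ===== VERDICT (by name: the statement is the Claim_ definition above) =====
theorem get_test_inputs_spec : Claim_equal_get_test_inputs := by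
  intro input _
  unfold Spec_get_test_inputs get_test_inputs get_test_inputs_alt
  rw [foldl_lines, splitOn_newline_flatten]
  simp
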